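-- pv_equiv track=rewrite | github.com/hchulvej/projecteuler | euler_719.py | partition_number
-- ===== SOURCE A (Python) =====
-- memo = {}
--
-- def partition_number(number):
--     # Convert the number to string to handle partitions
--     num_str = str(number)
--
--     # Helper recursive function
--     def helper(s):
--         # If already computed, return from memo
--         if s in memo:
--             return memo[s]
--
--         # Base case: if only one digit, return as a partition
--         if len(s) == 1:
--             return [(int(s),)]
--
--         partitions = []
--
--         # Partition the string in all possible ways
--         for i in range(1, len(s)):
--             left_part = int(s[:i])
--             right_partitions = helper(s[i:])
--             # Append the current partition (left_part, and all right partitions)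
--             for right in right_partitions:
--                 partitions.append((left_part,) + right)
--
--         # Include the whole string as a partition (the original number)
--         partitions.append((int(s),))
--
--         # Store the result in memo
--         memo[s] = partitions
--         return partitions
--
--     # Call the helper function on the entire number as a string
--     return helper(num_str)
-- ===== SOURCE B (Python) =====
-- def partition_number(number):
--     s = str(number)
--     tails = []  # tails[k] holds the partitions of s[i + 1 + k:] for the current i
--     for i in range(len(s) - 1, -1, -1):
--         suffix = s[i:]
--         cur = [(int(suffix[:k + 1]),) + p for k, dpj in enumerate(tails) for p in dpj]
--         cur.append((int(suffix),))
--         tails.insert(0, cur)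
--     return tails[0]
-- ===== Notes on version B (the rewrite author's own statement) =====
-- stated objective: alternative
-- what changed: Replaces A's memoized top-down recursion (with a module-global memo dict) on suffix strings by an explicit bottom-up dynamic-programming loop that builds the table of partitions for every suffix of str(number) from the shortest suffix up, with no recursion and no global state.
import Mathlib
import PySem

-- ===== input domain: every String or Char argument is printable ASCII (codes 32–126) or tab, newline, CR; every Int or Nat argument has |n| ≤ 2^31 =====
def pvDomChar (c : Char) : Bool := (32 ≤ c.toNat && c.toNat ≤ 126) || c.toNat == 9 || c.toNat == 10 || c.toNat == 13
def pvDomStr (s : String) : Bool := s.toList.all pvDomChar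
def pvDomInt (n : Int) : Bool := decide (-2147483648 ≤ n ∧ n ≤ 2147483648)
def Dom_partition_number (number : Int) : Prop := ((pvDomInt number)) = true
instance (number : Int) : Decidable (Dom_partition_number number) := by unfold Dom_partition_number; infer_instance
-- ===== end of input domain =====

-- B replaces A's memoized top-down recursion by an explicit bottom-up suffix table (objective: alternative).
-- A mutates the module-global 'memo'; B does not — the claim is about the return value only.

-- ===== PORT A =====
-- int(substring): exact where Python's int() succeeds (the digit substrings admitted by Pre_); getD 0 is never hit there
def pvIntOf (cs : List Char) : Int := (PySem.Int.ofChars? cs).getD 0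

-- helper(s): the global memo only caches values, it never changes them, so the port recomputes
def pvHelperA (s : List Char) : List (List Int) :=
  if s.length = 1 then
    [[pvIntOf s]]
  else
    ((PySem.List.pyRange 1 s.length 1).attach.foldl
      (fun acc i =>
        ((pvHelperA (PySem.List.slice s (some i.1) none)).foldl
          (fun acc2 r => acc2 ++ [pvIntOf (PySem.List.slice s none (some i.1)) :: r]) acc)) [])
    ++ [[pvIntOf s]]
termination_by s.length
decreasing_by

  have hm := (PySem.List.mem_pyRange_one).1 i.2
  rw [PySem.List.slice_from _ (by omega)]
  simp only [List.length_drop]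
  omega

def partition_number (number : Int) : List (List Int) :=
  pvHelperA (PySem.Int.toChars number)

-- ===== PORT B =====
-- one loop body of Source B: cur built from the current suffix and the table of strictly shorter suffixes
def pvStep (suffix : List Char) (tails : List (List (List Int))) : List (List Int) :=
  ((PySem.List.enumerate tails 0).flatMap
    (fun kd => kd.2.map (fun p => pvIntOf (PySem.List.slice suffix none (some (kd.1 + 1))) :: p)))
  ++ [[pvIntOf suffix]]

-- the loop 'for i in range(len(s)-1, -1, -1): tails.insert(0, cur)' as right-to-left recursion over s
def pvBuild : List Char → List (List (List Int))
  | [] => []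
  | c :: rest =>
    let t := pvBuild rest
    pvStep (c :: rest) t :: t

def partition_number_alt (number : Int) : List (List Int) :=
  (pvBuild (PySem.Int.toChars number)).headD []

-- ===== PRECONDITION & SPEC =====
-- A raises ValueError on every negative number (int('-') on the sign character); Pre_ excludes exactly those.
def Pre_partition_number (number : Int) : Prop := 0 ≤ number
instance (number : Int) : Decidable (Pre_partition_number number) := by unfold Pre_partition_number; infer_instance
def pvWitness_partition_number : Int := (1203)

def Spec_partition_number (number : Int) (out : List (List Int)) : Prop := out = partition_number_alt number
instance (number : Int) (out : List (List Int)) : Decidable (Spec_partition_number number out) := by unfold Spec_partition_number; infer_instance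

-- ===== CLAIM (what is proved, stated in full; the proofs are below) =====
def Claim_equal_partition_number : Prop := ∀ (number : Int), Dom_partition_number number → Pre_partition_number number → Spec_partition_number number (partition_number number)

-- ===== LEMMAS AND PROOFS =====

-- the list [helper(s[k:]) for k in range(len(s))] that pvBuild is claimed to compute
def pvTails : List Char → List (List (List Int))
  | [] => []
  | c :: rest => pvHelperA (c :: rest) :: pvTails rest

theorem pv_enumerate_tails (s : List Char) (t : List Char) : ∀ (a : Int),
    (PySem.List.enumerate (pvTails t) a).flatMap
        (fun kd => kd.2.map (fun p => pvIntOf (PySem.List.slice s none (some (kd.1 + 1))) :: p))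
      = (PySem.List.pyRange a (a + ((t.length : Nat) : Int)) 1).flatMap
          (fun i => (pvHelperA (t.drop (i - a).toNat)).map
            (fun p => pvIntOf (PySem.List.slice s none (some (i + 1))) :: p)) := by
  induction t with
  | nil => intro a; simp [pvTails, PySem.List.enumerate_nil, PySem.List.pyRange_one_eq_nil]
  | cons c r ih =>
    intro a
    rw [pvTails, PySem.List.enumerate_cons, List.flatMap_cons, ih]
    have hb : a + (((c :: r).length : Nat) : Int) = (a + 1) + ((r.length : Nat) : Int) := by
      simp only [List.length_cons]; push_cast; ring
    have hcons := PySem.List.pyRange_one_cons (a := a) (b := a + 1 + ((r.length : Nat) : Int)) (by omega)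
    rw [hb, hcons, List.flatMap_cons]
    simp only [sub_self, Int.toNat_zero, List.drop_zero]
    congr 1
    apply List.flatMap_congr
    intro i hi
    have hm := (PySem.List.mem_pyRange_one).1 hi
    have hd : (i - a).toNat = (i - (a + 1)).toNat + 1 := by omega
    rw [hd, List.drop_succ_cons]

theorem pvStep_eq (c : Char) (rest : List Char) :
    pvStep (c :: rest) (pvTails rest) = pvHelperA (c :: rest) := by
  cases rest with
  | nil =>
    rw [pvHelperA]
    simp [pvStep, pvTails, PySem.List.enumerate_nil]
  | cons d r =>
    rw [pvHelperA, if_neg (by simp)]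
    simp only [PySem.List.foldl_append_singleton_eq_map]
    rw [PySem.List.foldl_append_eq_flatMap, List.nil_append]
    unfold pvStep
    rw [pv_enumerate_tails (c :: d :: r) (d :: r) 0]
    simp only [List.flatMap_subtype, List.unattach_attach]
    congr 1
    rw [PySem.List.pyRange_one, PySem.List.pyRange_one, List.flatMap_map, List.flatMap_map]
    have hc : ((0 : Int) + (((d :: r).length : Nat) : Int) - 0).toNat
        = ((((c :: d :: r).length : Nat) : Int) - 1).toNat := by simp
    rw [hc]
    apply List.flatMap_congr
    intro k hk
    have h1 : PySem.List.slice (c :: d :: r) (some (1 + (k : Int))) none = (d :: r).drop k := by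
      rw [PySem.List.slice_from _ (by omega)]
      have h : ((1 : Int) + (k : Int)).toNat = k + 1 := by omega
      rw [h, List.drop_succ_cons]
    have h2 : ((0 : Int) + (k : Int) - 0).toNat = k := by omega
    have h3 : (0 : Int) + (k : Int) + 1 = 1 + (k : Int) := by ring
    rw [h1, h2, h3]

theorem pvBuild_eq (s : List Char) : pvBuild s = pvTails s := by
  induction s with
  | nil => rfl
  | cons c r ih => rw [pvBuild, pvTails, ih, pvStep_eq]

theorem pv_toDigitsCore_len (b : Nat) :
    ∀ (f m : Nat) (l : List Char), l.length ≤ (Nat.toDigitsCore b f m l).length := by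
  intro f
  induction f with
  | zero => intro m l; simp [Nat.toDigitsCore]
  | succ f ih =>
    intro m l
    simp only [Nat.toDigitsCore]
    split
    · simp
    · exact le_trans (by simp) (ih (m / b) (Nat.digitChar (m % b) :: l))

theorem pv_toDigits_ne_nil (b n : Nat) : Nat.toDigits b n ≠ [] := by
  have h1 : 1 ≤ (Nat.toDigits b n).length := by
    simp only [Nat.toDigits, Nat.toDigitsCore]
    split
    · simp
    · exact le_trans (by simp) (pv_toDigitsCore_len b n (n / b) [Nat.digitChar (n % b)])
  intro h
  rw [h] at h1
  simp at h1

theorem pv_toChars_ne_nil (n : Int) : PySem.Int.toChars n ≠ [] := by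
  unfold PySem.Int.toChars
  split
  · simp
  · exact pv_toDigits_ne_nil 10 n.toNat

-- ===== VERDICT (by name: the statement is the Claim_ definition above) =====
theorem partition_number_spec : Claim_equal_partition_number := by
  intro n _ _
  unfold Spec_partition_number partition_number partition_number_alt
  rw [pvBuild_eq]
  rcases h : PySem.Int.toChars n with _ | ⟨c, r⟩
  · exact absurd h (pv_toChars_ne_nil n)
  · rw [pvTails, List.headD_cons]
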